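-- pv_equiv track=rewrite | github.com/timhuijsmans1/search_engine | search/retrieval/retrieval_models/proximity_retrieval/proximity_retrieval.py | proximity_retrieval
-- ===== SOURCE A (Python) =====
-- def check_if_terms_in_proximity(term1_positions_in_doc, term2_positions_in_doc, proximity_value, doc_id):
--     """
--     Function to loop over all position of term1 in given doc and term 2 in given doc comparing differences between positions
--     When doc matches given proximtiy_value, return doc id
--     """
--     for term1_position in term1_positions_in_doc:
--         for term2_position in term2_positions_in_doc:
--             if abs(term1_position - term2_position) <= proximity_value:  # using absolute difference for proximity retrieval
--                 return doc_id
--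
-- def proximity_retrieval(mini_index, proximity_value):
--     # extract each index separately - main assumption we only have two terms
--     query_terms = list(mini_index.keys())
--     term1_inverted_index = mini_index[query_terms[0]]
--     term2_inverted_index = mini_index[query_terms[1]]
--
--     term1_positions_dict = term1_inverted_index[1]
--     term2_positions_dict = term2_inverted_index[1]
--
--     common_docs = term1_positions_dict.keys() & term2_positions_dict.keys()
--     common_docs = sorted(common_docs)
--
--     documents_where_terms_are_in_proximity = []
--
--     for doc_id in common_docs:
--         term1_positions_in_doc = term1_positions_dict[doc_id]
--         term2_positions_in_doc = term2_positions_dict[doc_id]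
--
--         doc_in_proximity = check_if_terms_in_proximity(term1_positions_in_doc, term2_positions_in_doc, proximity_value,
--                                                        doc_id)
--         documents_where_terms_are_in_proximity.append(doc_in_proximity)
--     # The list will contain some none elements based on the return of check_if_terms_in_proximity
--     documents_where_terms_are_in_proximity = [doc for doc in documents_where_terms_are_in_proximity if doc is not None]
--     return documents_where_terms_are_in_proximity
-- ===== SOURCE B (Python) =====
-- def _close(xs, ys, proximity_value):
--     # two-pointer sweep over two ascending position lists
--     i = j = 0
--     while i < len(xs) and j < len(ys):
--         d = xs[i] - ys[j]
--         if abs(d) <= proximity_value: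
--             return True
--         if d < 0:
--             i += 1
--         else:
--             j += 1
--     return False
--
--
-- def proximity_retrieval(mini_index, proximity_value):
--     query_terms = list(mini_index.keys())
--     term1_positions = mini_index[query_terms[0]][1]
--     term2_positions = mini_index[query_terms[1]][1]
--     result = []
--     for doc_id in sorted(term1_positions.keys() & term2_positions.keys()):
--         if _close(sorted(term1_positions[doc_id]), sorted(term2_positions[doc_id]), proximity_value):
--             result.append(doc_id)
--     return result
-- ===== Notes on version B (the rewrite author's own statement) =====
-- stated objective: alternative
-- what changed: Per common document, A scans every pair of positions of the two terms (nested loops with early return); B sorts each position list and runs a single two-pointer sweep to detect a pair within the proximity, and appends matching doc ids directly instead of appending None placeholders and filtering them out afterwards.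
import Mathlib
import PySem

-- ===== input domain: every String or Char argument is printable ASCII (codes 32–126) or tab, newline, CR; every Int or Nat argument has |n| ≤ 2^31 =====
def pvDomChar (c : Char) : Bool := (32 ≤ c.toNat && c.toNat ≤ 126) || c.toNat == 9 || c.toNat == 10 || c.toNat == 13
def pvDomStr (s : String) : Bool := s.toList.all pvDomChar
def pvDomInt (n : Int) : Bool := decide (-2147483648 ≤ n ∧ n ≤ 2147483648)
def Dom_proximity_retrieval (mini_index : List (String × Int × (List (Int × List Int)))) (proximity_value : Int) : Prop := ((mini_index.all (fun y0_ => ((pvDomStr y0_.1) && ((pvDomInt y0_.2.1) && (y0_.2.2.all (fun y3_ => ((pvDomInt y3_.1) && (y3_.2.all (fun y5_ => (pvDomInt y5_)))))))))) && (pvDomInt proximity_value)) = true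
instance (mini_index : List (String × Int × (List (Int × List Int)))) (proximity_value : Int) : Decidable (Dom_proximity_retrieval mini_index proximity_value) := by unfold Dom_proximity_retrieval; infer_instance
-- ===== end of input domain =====

-- B replaces A's per-document nested scan over the two position lists by a sort plus a
-- single two-pointer sweep, and collects matching doc ids directly instead of appending
-- None placeholders and filtering them afterwards (objective: alternative).

-- ===== PORT A =====
-- inner 'for term2_position in term2_positions_in_doc: if abs(...) <= proximity_value: return doc_id'
def checkInnerLoop (term1_position : Int) (term2_positions : List Int) (proximity_value : Int) : Bool :=
  match term2_positions with
  | [] => false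
  | b :: bs =>
    if |term1_position - b| ≤ proximity_value then true
    else checkInnerLoop term1_position bs proximity_value

def check_if_terms_in_proximity (term1_positions_in_doc term2_positions_in_doc : List Int)
    (proximity_value doc_id : Int) : Option Int :=
  match term1_positions_in_doc with
  | [] => none   -- falls off the loop: returns None
  | a :: rest =>
    if checkInnerLoop a term2_positions_in_doc proximity_value then some doc_id
    else check_if_terms_in_proximity rest term2_positions_in_doc proximity_value doc_id

def proximity_retrieval (mini_index : List (String × Int × (List (Int × List Int)))) (proximity_value : Int) : List Int :=
  let d := PySem.Dict.ofList mini_index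
  let query_terms := d.keys
  match PySem.List.pyGet? query_terms 0, PySem.List.pyGet? query_terms 1 with
  | some q0, some q1 =>
    match d.get? q0, d.get? q1 with
    | some term1_inverted_index, some term2_inverted_index =>
      let term1_positions_dict := PySem.Dict.ofList term1_inverted_index.2
      let term2_positions_dict := PySem.Dict.ofList term2_inverted_index.2
      let common_docs := PySem.List.sorted
        (PySem.Set.inter term1_positions_dict.keys term2_positions_dict.keys) (fun x => x) false
      -- doc_id ∈ both key sets, so dict lookup cannot raise: getD is exact here
      let results := common_docs.map (fun doc_id =>
        check_if_terms_in_proximity (term1_positions_dict.getD doc_id [])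
          (term2_positions_dict.getD doc_id []) proximity_value doc_id)
      results.filterMap id   -- [doc for doc in ... if doc is not None]
    | _, _ => []   -- unreachable: q0, q1 are keys of d
  | _, _ => []     -- IndexError: fewer than two query terms; excluded by Pre_

-- ===== PORT B =====
-- two-pointer sweep over two ascending position lists
def closeTP (proximity_value : Int) : List Int → List Int → Bool
  | a :: as, b :: bs =>
    if |a - b| ≤ proximity_value then true
    else if a - b < 0 then closeTP proximity_value as (b :: bs)
    else closeTP proximity_value (a :: as) bs
  | _, _ => false
termination_by xs ys => xs.length + ys.length

def proximity_retrieval_alt (mini_index : List (String × Int × (List (Int × List Int)))) (proximity_value : Int) : List Int :=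
  let d := PySem.Dict.ofList mini_index
  let query_terms := d.keys
  match PySem.List.pyGet? query_terms 0 with
  | none => []
  | some q0 =>
    match PySem.List.pyGet? query_terms 1 with
    | none => []
    | some q1 =>
      match d.get? q0 with
      | none => []
      | some idx1 =>
        match d.get? q1 with
        | none => []
        | some idx2 =>
          let pos1 := PySem.Dict.ofList idx1.2
          let pos2 := PySem.Dict.ofList idx2.2
          let common := PySem.List.sorted (PySem.Set.inter pos1.keys pos2.keys) (fun x => x) false
          common.filter (fun doc_id =>
            closeTP proximity_value
              (PySem.List.sorted (pos1.getD doc_id []) (fun x => x) false)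
              (PySem.List.sorted (pos2.getD doc_id []) (fun x => x) false))

-- ===== PRECONDITION & SPEC =====
-- Pre_ excludes only the inputs where A raises IndexError: a mini_index with fewer than two distinct term keys.
def Pre_proximity_retrieval (mini_index : List (String × Int × (List (Int × List Int)))) (proximity_value : Int) : Prop :=
  2 ≤ (PySem.Set.ofList (mini_index.map (·.1))).length
instance (mini_index : List (String × Int × (List (Int × List Int)))) (proximity_value : Int) : Decidable (Pre_proximity_retrieval mini_index proximity_value) := by unfold Pre_proximity_retrieval; infer_instance

def pvWitness_proximity_retrieval : (List (String × Int × (List (Int × List Int)))) × Int :=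
  ([("cat", 2, [(1, [3, 9]), (2, [7])]), ("dog", 2, [(1, [5]), (3, [1])])], 2)

def Spec_proximity_retrieval (mini_index : List (String × Int × (List (Int × List Int)))) (proximity_value : Int) (out : List Int) : Prop := out = proximity_retrieval_alt mini_index proximity_value
instance (mini_index : List (String × Int × (List (Int × List Int)))) (proximity_value : Int) (out : List Int) : Decidable (Spec_proximity_retrieval mini_index proximity_value out) := by unfold Spec_proximity_retrieval; infer_instance

-- ===== CLAIM (what is proved, stated in full; the proofs are below) =====
def Claim_equal_proximity_retrieval : Prop := ∀ (mini_index : List (String × Int × (List (Int × List Int)))) (proximity_value : Int), Dom_proximity_retrieval mini_index proximity_value → Pre_proximity_retrieval mini_index proximity_value → Spec_proximity_retrieval mini_index proximity_value (proximity_retrieval mini_index proximity_value)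

-- ===== LEMMAS AND PROOFS =====

-- A's inner loop is an existence test
theorem checkInnerLoop_eq_any (a : Int) (t2 : List Int) (p : Int) :
    checkInnerLoop a t2 p = t2.any (fun b => decide (|a - b| ≤ p)) := by
  induction t2 with
  | nil => rfl
  | cons b bs ih =>
    simp only [checkInnerLoop, List.any_cons, ih]
    split_ifs with h <;> simp [h]

-- A's outer loop returns some doc_id iff some pair of positions is close
theorem check_eq_if (t1 t2 : List Int) (p doc : Int) :
    check_if_terms_in_proximity t1 t2 p doc =
      if t1.any (fun a => t2.any (fun b => decide (|a - b| ≤ p))) then some doc else none := by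
  induction t1 with
  | nil => rfl
  | cons a rest ih =>
    simp only [check_if_terms_in_proximity, checkInnerLoop_eq_any, List.any_cons, ih]
    by_cases h : (t2.any fun b => decide (|a - b| ≤ p)) = true <;> simp [h]

-- soundness: a two-pointer hit exhibits a close pair
theorem closeTP_sound (p : Int) (xs ys : List Int) (h : closeTP p xs ys = true) :
    ∃ a ∈ xs, ∃ b ∈ ys, |a - b| ≤ p := by
  induction xs, ys using closeTP.induct p with
  | case1 a as b bs hle => exact ⟨a, by simp, b, by simp, hle⟩
  | case2 a as b bs hgt hlt ih =>
    rw [closeTP, if_neg hgt, if_pos hlt] at h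
    obtain ⟨x, hx, y, hy, hxy⟩ := ih h
    exact ⟨x, List.mem_cons_of_mem _ hx, y, hy, hxy⟩
  | case3 a as b bs hgt hge ih =>
    rw [closeTP, if_neg hgt, if_neg hge] at h
    obtain ⟨x, hx, y, hy, hxy⟩ := ih h
    exact ⟨x, hx, y, List.mem_cons_of_mem _ hy, hxy⟩
  | case4 xs ys h1 =>
    cases xs with
    | nil => simp [closeTP] at h
    | cons a as =>
      cases ys with
      | nil => simp [closeTP] at h
      | cons b bs => exact (h1 a as b bs rfl rfl).elim

-- completeness: on ascending lists the sweep finds any close pair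
theorem closeTP_complete (p : Int) (xs ys : List Int)
    (hx : xs.Pairwise (· ≤ ·)) (hy : ys.Pairwise (· ≤ ·))
    (h : ∃ a ∈ xs, ∃ b ∈ ys, |a - b| ≤ p) : closeTP p xs ys = true := by
  induction xs, ys using closeTP.induct p with
  | case1 a as b bs hle => rw [closeTP, if_pos hle]
  | case2 a as b bs hgt hlt ih =>
    rw [closeTP, if_neg hgt, if_pos hlt]
    obtain ⟨x, hxm, y, hym, hxy⟩ := h
    rcases List.mem_cons.mp hxm with rfl | hxm'
    · -- x = a pairs with nothing in b :: bs: every y there is ≥ b > a + p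
      exfalso
      have hby : b ≤ y := by
        rcases List.mem_cons.mp hym with rfl | hym'
        · exact le_refl _
        · exact (List.pairwise_cons.mp hy).1 y hym'
      rw [abs_le] at hxy
      have : ¬ |x - b| ≤ p := hgt
      rw [abs_le] at this
      omega
    · exact ih (List.pairwise_cons.mp hx).2 hy ⟨x, hxm', y, hym, hxy⟩
  | case3 a as b bs hgt hge ih =>
    rw [closeTP, if_neg hgt, if_neg hge]
    obtain ⟨x, hxm, y, hym, hxy⟩ := h
    rcases List.mem_cons.mp hym with rfl | hym'
    · exfalso
      have hax : a ≤ x := by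
        rcases List.mem_cons.mp hxm with rfl | hxm'
        · exact le_refl _
        · exact (List.pairwise_cons.mp hx).1 x hxm'
      rw [abs_le] at hxy
      have : ¬ |a - y| ≤ p := hgt
      rw [abs_le] at this
      omega
    · exact ih hx (List.pairwise_cons.mp hy).2 ⟨x, hxm, y, hym', hxy⟩
  | case4 xs ys h1 =>
    exfalso
    cases xs with
    | nil => obtain ⟨x, hxm, _⟩ := h; simp at hxm
    | cons a as =>
      cases ys with
      | nil => obtain ⟨x, _, y, hym, _⟩ := h; simp at hym
      | cons b bs => exact h1 a as b bs rfl rfl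

-- the two per-document tests agree
theorem closeTP_sorted_eq_any (p : Int) (t1 t2 : List Int) :
    closeTP p (PySem.List.sorted t1 (fun x => x) false) (PySem.List.sorted t2 (fun x => x) false)
      = t1.any (fun a => t2.any (fun b => decide (|a - b| ≤ p))) := by
  by_cases hex : ∃ a ∈ t1, ∃ b ∈ t2, |a - b| ≤ p
  · obtain ⟨a, ha, b, hbm, hab⟩ := hex
    have h1 := closeTP_complete p (PySem.List.sorted t1 (fun x => x) false)
      (PySem.List.sorted t2 (fun x => x) false)
      (PySem.List.sorted_pairwise t1 (fun x => x))
      (PySem.List.sorted_pairwise t2 (fun x => x))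
      ⟨a, (PySem.List.mem_sorted _ _ _ _).mpr ha, b, (PySem.List.mem_sorted _ _ _ _).mpr hbm, hab⟩
    rw [h1]
    symm
    simp only [List.any_eq_true, decide_eq_true_eq]
    exact ⟨a, ha, b, hbm, hab⟩
  · have h1 : closeTP p (PySem.List.sorted t1 (fun x => x) false)
        (PySem.List.sorted t2 (fun x => x) false) = false := by
      cases hc : closeTP p (PySem.List.sorted t1 (fun x => x) false)
        (PySem.List.sorted t2 (fun x => x) false)
      · rfl
      · exfalso
        obtain ⟨a, ha, b, hbm, hab⟩ := closeTP_sound p _ _ hc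
        exact hex ⟨a, (PySem.List.mem_sorted _ _ _ _).mp ha, b, (PySem.List.mem_sorted _ _ _ _).mp hbm, hab⟩
    rw [h1]
    symm
    simp only [List.any_eq_false]
    intro a ha
    simp only [Bool.not_eq_true, List.any_eq_false, decide_eq_false_iff_not]
    exact fun b hbm hle => hex ⟨a, ha, b, hbm, hle⟩

-- 'append Option results then drop the Nones' is 'filter'
theorem loop_filterMap_eq_filter (l : List Int) (f : Int → Option Int) (c : Int → Bool)
    (hfc : ∀ d ∈ l, f d = if c d then some d else none) :
    (l.map f).filterMap id = l.filter c := by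
  induction l with
  | nil => rfl
  | cons x xs ih =>
    have hx := hfc x (List.mem_cons_self)
    have ih' : List.filterMap (fun d => f d) xs = List.filter c xs := by
      simpa using ih (fun d hd => hfc d (List.mem_cons_of_mem _ hd))
    by_cases h : c x = true <;>
      simp [hx, h, ih']

-- ===== VERDICT (by name: the statement is the Claim_ definition above) =====
theorem proximity_retrieval_spec : Claim_equal_proximity_retrieval := by
  intro mini_index proximity_value _ _
  unfold Spec_proximity_retrieval proximity_retrieval proximity_retrieval_alt
  dsimp only
  cases h0 : PySem.List.pyGet? (PySem.Dict.ofList mini_index).keys 0 with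
  | none => rfl
  | some q0 =>
    cases h1 : PySem.List.pyGet? (PySem.Dict.ofList mini_index).keys 1 with
    | none => rfl
    | some q1 =>
      dsimp only
      cases hg0 : (PySem.Dict.ofList mini_index).get? q0 with
      | none => rfl
      | some i1 =>
        cases hg1 : (PySem.Dict.ofList mini_index).get? q1 with
        | none => rfl
        | some i2 =>
          apply loop_filterMap_eq_filter
          intro doc _
          rw [check_eq_if, closeTP_sorted_eq_any]
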